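-- pv_equiv track=rewrite | github.com/gmichalo/question_identification_on_medical_logs | preprocessing/question_indetification.py | W5H1_aux_fist
-- ===== SOURCE A (Python) =====
-- W5H1 = ["who ", "what ", "where ", "when ", "why ", "how "]
--
-- aux_vers = ["am", "is", "are", "was", "were", "do", "does", "did", "have", "had", "has", "will"]
--
-- def W5H1_aux_fist(sentence):
--     W5H1_flag_aux = False
--     for word in W5H1:
--         for aux in aux_vers:
--             word_temp = word + aux
--             if sentence.lower().find(word_temp) == 0:
--                 W5H1_flag_aux = True
--                 break
--     return W5H1_flag_aux
-- ===== SOURCE B (Python) =====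
-- W5H1 = ["who ", "what ", "where ", "when ", "why ", "how "]
--
-- aux_vers = ["am", "is", "are", "was", "were", "do", "does", "did", "have", "had", "has", "will"]
--
-- def W5H1_aux_fist(sentence):
--     low = sentence.lower()
--     for word in W5H1:
--         if low.startswith(word):
--             rest = low[len(word):]
--             if any(rest.startswith(aux) for aux in aux_vers):
--                 return True
--     return False
-- ===== Notes on version B (the rewrite author's own statement) =====
-- stated objective: faster
-- what changed: Lowercases once and tests the question-word prefix first, then the auxiliary prefix on the remainder, returning early; instead of A's flag loop over all 72 concatenated prefixes each tested with find on a freshly lowercased copy.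
import Mathlib
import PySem

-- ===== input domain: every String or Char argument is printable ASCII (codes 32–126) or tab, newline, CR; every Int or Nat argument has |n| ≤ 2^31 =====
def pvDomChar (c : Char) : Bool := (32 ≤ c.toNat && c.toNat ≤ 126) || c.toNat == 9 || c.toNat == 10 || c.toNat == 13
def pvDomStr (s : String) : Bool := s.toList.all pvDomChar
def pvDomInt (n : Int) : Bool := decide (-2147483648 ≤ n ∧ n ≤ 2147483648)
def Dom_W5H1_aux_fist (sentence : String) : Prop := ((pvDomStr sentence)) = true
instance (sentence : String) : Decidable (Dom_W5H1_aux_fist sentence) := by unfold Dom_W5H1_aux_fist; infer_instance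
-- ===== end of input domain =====

-- B lowercases once and matches the question word, then the auxiliary on the remainder (simpler; A scans 72 concatenated prefixes with find).

def pvW5H1 : List String := ["who ", "what ", "where ", "when ", "why ", "how "]

def pvAux : List String := ["am", "is", "are", "was", "were", "do", "does", "did", "have", "had", "has", "will"]

-- ===== PORT A =====
-- inner 'for aux in aux_vers' loop of A: sets the flag to True and breaks on a match
def pvInnerA (sentence : String) (word : String) (flag : Bool) : List String → Bool
  | [] => flag
  | aux :: rest =>
    let word_temp := word ++ aux
    if PySem.Str.find (PySem.Str.lower sentence) word_temp == 0 then true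
    else pvInnerA sentence word flag rest

def W5H1_aux_fist (sentence : String) : Bool :=
  pvW5H1.foldl (fun flag word => pvInnerA sentence word flag pvAux) false

-- ===== PORT B =====
-- B's 'for word in W5H1' loop with its early return
def pvLoopB (low : String) : List String → Bool
  | [] => false
  | word :: rest =>
    if PySem.Str.startswith low word then
      if pvAux.any (fun aux =>
          PySem.Str.startswith (PySem.Str.slice low (some (PySem.Str.len word)) none) aux) then
        true
      else pvLoopB low rest
    else pvLoopB low rest

def W5H1_aux_fist_alt (sentence : String) : Bool :=
  let low := PySem.Str.lower sentence
  pvLoopB low pvW5H1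

-- ===== PRECONDITION & SPEC =====
def Spec_W5H1_aux_fist (sentence : String) (out : Bool) : Prop := out = W5H1_aux_fist_alt sentence
instance (sentence : String) (out : Bool) : Decidable (Spec_W5H1_aux_fist sentence out) := by unfold Spec_W5H1_aux_fist; infer_instance

-- ===== CLAIM (what is proved, stated in full; the proofs are below) =====
def Claim_equal_W5H1_aux_fist : Prop := ∀ (sentence : String), Dom_W5H1_aux_fist sentence → Spec_W5H1_aux_fist sentence (W5H1_aux_fist sentence)

-- ===== LEMMAS AND PROOFS =====

-- s.find(t) == 0 means exactly 't is a prefix of s'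
theorem pv_find_eq_zero_iff (s t : List Char) : PySem.Chars.find s t = 0 ↔ t <+: s := by
  constructor
  · intro h
    have h0 : 0 ≤ PySem.Chars.find s t := by omega
    have := (PySem.Chars.find_spec h0).1
    simpa [h] using this
  · intro h
    have h0 : 0 ≤ PySem.Chars.find s t := by
      rw [PySem.Chars.find_nonneg_iff]; exact h.isInfix
    obtain ⟨_, hmin⟩ := PySem.Chars.find_spec h0
    by_contra hne
    have hpos : 0 < (PySem.Chars.find s t).toNat := by omega
    exact hmin 0 hpos (by simpa using h)

-- splitting a concatenated prefix into the two stages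
theorem pv_append_prefix_iff (w a s : List Char) :
    (w ++ a) <+: s ↔ w <+: s ∧ a <+: s.drop w.length := by
  constructor
  · rintro ⟨t, ht⟩
    refine ⟨⟨a ++ t, by simpa using ht⟩, ⟨t, ?_⟩⟩
    rw [← ht]; simp
  · rintro ⟨⟨u, hu⟩, t, ht⟩
    subst hu
    rw [List.drop_left] at ht
    exact ⟨t, by simp [← ht]⟩

-- per (word, aux) pair: A's test equals B's two-stage test
theorem pv_pair_eq (low w a : String) :
    (PySem.Str.find low (w ++ a) == 0) =
      (PySem.Str.startswith low w &&
        PySem.Str.startswith (PySem.Str.slice low (some (PySem.Str.len w)) none) a) := by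
  rw [Bool.eq_iff_iff]
  simp only [beq_iff_eq, Bool.and_eq_true, PySem.Str.find_eq, PySem.Str.startswith_eq,
    PySem.Str.toList_slice, PySem.Chars.slice_eq_listSlice, PySem.Str.len_eq,
    PySem.List.slice_from_natCast, PySem.Chars.startswith_iff, String.toList_append]
  rw [pv_find_eq_zero_iff]
  exact pv_append_prefix_iff w.toList a.toList low.toList

theorem pv_innerA_eq (sentence w : String) (flag : Bool) (auxes : List String) :
    pvInnerA sentence w flag auxes =
      (flag || auxes.any (fun a => PySem.Str.find (PySem.Str.lower sentence) (w ++ a) == 0)) := by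
  induction auxes with
  | nil => simp [pvInnerA]
  | cons a rest ih =>
    simp only [pvInnerA, List.any_cons, ih]
    cases hc : (PySem.Str.find (PySem.Str.lower sentence) (w ++ a) == 0) <;>
      cases flag <;> simp

theorem pv_foldlA_eq (sentence : String) (words : List String) (b : Bool) :
    words.foldl (fun flag word => pvInnerA sentence word flag pvAux) b =
      (b || words.any (fun w =>
        pvAux.any (fun a => PySem.Str.find (PySem.Str.lower sentence) (w ++ a) == 0))) := by
  induction words generalizing b with
  | nil => simp
  | cons w rest ih =>
    simp only [List.foldl_cons, List.any_cons]
    rw [ih, pv_innerA_eq, Bool.or_assoc]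

theorem pv_loopB_eq (low : String) (words : List String) :
    pvLoopB low words =
      words.any (fun w => PySem.Str.startswith low w &&
        pvAux.any (fun a =>
          PySem.Str.startswith (PySem.Str.slice low (some (PySem.Str.len w)) none) a)) := by
  induction words with
  | nil => simp [pvLoopB]
  | cons w rest ih =>
    cases hsw : PySem.Str.startswith low w <;>
      cases haux : pvAux.any (fun a =>
        PySem.Str.startswith (PySem.Str.slice low (some (PySem.Str.len w)) none) a) <;>
      simp only [pvLoopB, ih, List.any_cons, hsw, haux] <;> simp

theorem pv_and_any (c : Bool) (l : List String) (g : String → Bool) :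
    l.any (fun a => c && g a) = (c && l.any g) := by
  cases c <;> simp

-- ===== VERDICT (by name: the statement is the Claim_ definition above) =====
theorem W5H1_aux_fist_spec : Claim_equal_W5H1_aux_fist := by
  intro sentence _
  unfold Spec_W5H1_aux_fist W5H1_aux_fist W5H1_aux_fist_alt
  rw [pv_foldlA_eq, pv_loopB_eq, Bool.false_or]
  refine List.any_congr rfl (fun w => ?_)
  simp only [pv_pair_eq, pv_and_any]
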